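-- pv_equiv track=rewrite | github.com/Smb7/Network_Troubleshooting | app.py | parse_ipconfig_output
-- ===== SOURCE A (Python) =====
-- def parse_ipconfig_output(ipconfig_output):
--     adapters = []
--     current_adapter = {}
--     lines = ipconfig_output.split('\n')
--
--     for line in lines:
--         if line.strip() == '':
--             continue
--         if line.startswith('Ethernet adapter') or line.startswith('Wireless LAN adapter'):
--             if current_adapter:
--                 adapters.append(current_adapter)
--             current_adapter = {"name": line.strip()}
--         elif ':' in line:
--             key, value = map(str.strip, line.split(':', 1))
--             current_adapter[key.replace(' ', '_').lower()] = value
--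
--     if current_adapter:
--         adapters.append(current_adapter)
--
--     return adapters
-- ===== SOURCE B (Python) =====
-- def _is_header(line):
--     return line.startswith('Ethernet adapter') or line.startswith('Wireless LAN adapter')
--
--
-- def _build_adapter(block):
--     if block and _is_header(block[0]):
--         adapter = {"name": block[0].strip()}
--         body = block[1:]
--     else:
--         adapter = {}
--         body = block
--     for line in body:
--         if line.strip() and ':' in line:
--             key, value = line.split(':', 1)
--             adapter[key.strip().replace(' ', '_').lower()] = value.strip()
--     return adapter
--
--
-- def parse_ipconfig_output(ipconfig_output):
--     # phase 1: cut the text into blocks, a new block at every adapter header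
--     blocks = []
--     current_block = []
--     for line in ipconfig_output.split('\n'):
--         if _is_header(line):
--             blocks.append(current_block)
--             current_block = [line]
--         else:
--             current_block.append(line)
--     blocks.append(current_block)
--     # phase 2: each block independently becomes a dict; drop empty ones
--     return [d for d in map(_build_adapter, blocks) if d]
-- ===== Notes on version B (the rewrite author's own statement) =====
-- stated objective: alternative
-- what changed: Replaces A's single pass with one running dict and flush-on-header by a two-phase decomposition: first cut the lines into adapter blocks at header lines (keeping a nameless pre-header block), then build each block's dict independently and keep the non-empty ones.
import Mathlib
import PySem

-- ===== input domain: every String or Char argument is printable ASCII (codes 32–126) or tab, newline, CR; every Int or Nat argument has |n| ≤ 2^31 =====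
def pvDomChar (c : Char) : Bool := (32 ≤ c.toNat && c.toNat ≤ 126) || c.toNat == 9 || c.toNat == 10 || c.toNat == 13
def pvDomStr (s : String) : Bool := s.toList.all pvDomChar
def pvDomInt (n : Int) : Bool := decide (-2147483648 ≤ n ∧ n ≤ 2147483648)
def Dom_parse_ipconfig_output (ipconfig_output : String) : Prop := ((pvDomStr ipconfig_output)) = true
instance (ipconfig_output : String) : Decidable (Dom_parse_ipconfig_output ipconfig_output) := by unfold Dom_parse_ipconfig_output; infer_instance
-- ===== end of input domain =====

-- B re-implements the single running-dict loop as a two-phase decomposition (split into adapter blocks,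
-- then build each block's dict independently); objective: alternative decomposition, same cost.

-- ===== PORT A =====
def pvAHeader (line : String) : Bool :=
  PySem.Str.startswith line "Ethernet adapter" || PySem.Str.startswith line "Wireless LAN adapter"

def pvAInsert (cur : PySem.Dict String String) (line : String) : PySem.Dict String String :=
  match PySem.Str.splitMax? line ":" 1 with
  | some (k :: v :: _) =>
      cur.insert (PySem.Str.lower (PySem.Str.replace (PySem.Str.strip k) " " "_")) (PySem.Str.strip v)
  | _ => cur

def pvALoop : List String → List (List (String × String)) → PySem.Dict String String →
    List (List (String × String)) × PySem.Dict String String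
  | [], adapters, cur => (adapters, cur)
  | line :: rest, adapters, cur =>
    if PySem.Str.strip line = "" then pvALoop rest adapters cur
    else if pvAHeader line then
      pvALoop rest (if cur.items.isEmpty then adapters else adapters ++ [cur.items])
        (PySem.Dict.ofList [("name", PySem.Str.strip line)])
    else if PySem.Str.isIn ":" line then pvALoop rest adapters (pvAInsert cur line)
    else pvALoop rest adapters cur

def parse_ipconfig_output (ipconfig_output : String) : List (List (String × String)) :=
  let lines := (PySem.Str.split? ipconfig_output "\n").getD []
  let r := pvALoop lines [] PySem.Dict.empty
  if r.2.items.isEmpty then r.1 else r.1 ++ [r.2.items]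

-- ===== PORT B =====
def pvBHeader (line : String) : Bool :=
  PySem.Str.startswith line "Ethernet adapter" || PySem.Str.startswith line "Wireless LAN adapter"

def pvBStep (adapter : PySem.Dict String String) (line : String) : PySem.Dict String String :=
  if PySem.Str.strip line ≠ "" ∧ PySem.Str.isIn ":" line = true then
    match PySem.Str.splitMax? line ":" 1 with
    | some (k :: v :: _) =>
        adapter.insert (PySem.Str.lower (PySem.Str.replace (PySem.Str.strip k) " " "_")) (PySem.Str.strip v)
    | _ => adapter
  else adapter

def pvBuild (block : List String) : PySem.Dict String String :=
  match block with
  | [] => PySem.Dict.empty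
  | line :: rest =>
    if pvBHeader line then rest.foldl pvBStep (PySem.Dict.ofList [("name", PySem.Str.strip line)])
    else (line :: rest).foldl pvBStep PySem.Dict.empty

def pvBSplitStep (st : List (List String) × List String) (line : String) :
    List (List String) × List String :=
  if pvBHeader line then (st.1 ++ [st.2], [line]) else (st.1, st.2 ++ [line])

def parse_ipconfig_output_alt (ipconfig_output : String) : List (List (String × String)) :=
  let lines := (PySem.Str.split? ipconfig_output "\n").getD []
  let st := lines.foldl pvBSplitStep ([], [])
  (((st.1 ++ [st.2]).map pvBuild).filter (fun d => !d.items.isEmpty)).map (fun d => d.items)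

-- ===== PRECONDITION & SPEC =====
def Spec_parse_ipconfig_output (ipconfig_output : String) (out : List (List (String × String))) : Prop := out = parse_ipconfig_output_alt ipconfig_output
instance (ipconfig_output : String) (out : List (List (String × String))) : Decidable (Spec_parse_ipconfig_output ipconfig_output out) := by unfold Spec_parse_ipconfig_output; infer_instance

-- ===== CLAIM (what is proved, stated in full; the proofs are below) =====
def Claim_equal_parse_ipconfig_output : Prop := ∀ (ipconfig_output : String), Dom_parse_ipconfig_output ipconfig_output → Spec_parse_ipconfig_output ipconfig_output (parse_ipconfig_output ipconfig_output)

-- ===== LEMMAS AND PROOFS =====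

-- B's finalization: build each block's dict, keep the non-empty ones, as item lists.
def pvBFin (bs : List (List String)) : List (List (String × String)) :=
  ((bs.map pvBuild).filter (fun d => !d.items.isEmpty)).map (fun d => d.items)

lemma pvBFin_append (bs : List (List String)) (cb : List String) :
    pvBFin (bs ++ [cb]) =
      pvBFin bs ++ (if (pvBuild cb).items.isEmpty then [] else [(pvBuild cb).items]) := by
  by_cases h : (pvBuild cb).items.isEmpty <;>
    simp [pvBFin, List.filter_append, h]

lemma pvBStep_blank (d : PySem.Dict String String) (line : String)
    (h : PySem.Str.strip line = "") : pvBStep d line = d := by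
  simp [pvBStep, h]

lemma pvBStep_nocolon (d : PySem.Dict String String) (line : String)
    (h : PySem.Str.isIn ":" line = false) : pvBStep d line = d := by
  have h' : PySem.Chars.isIn [':'] line.toList = false := by simpa using h
  simp [pvBStep, h']

lemma pvBStep_kv (d : PySem.Dict String String) (line : String)
    (h1 : ¬ PySem.Str.strip line = "") (h2 : PySem.Str.isIn ":" line = true) :
    pvBStep d line = pvAInsert d line := by
  have h2' : PySem.Chars.isIn [':'] line.toList = true := by simpa using h2
  simp [pvBStep, pvAInsert, h1, h2']

lemma pvBuild_append (cb : List String) (line : String) (h : pvBHeader line = false) :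
    pvBuild (cb ++ [line]) = pvBStep (pvBuild cb) line := by
  cases cb with
  | nil => simp [pvBuild, h]
  | cons a t => by_cases ha : pvBHeader a <;> simp [pvBuild, ha, List.foldl_append]

lemma pv_header_nonblank (line : String) (hh : pvBHeader line = true) :
    ¬ PySem.Str.strip line = "" := by
  intro hb
  have hb' : PySem.Chars.strip line.toList = [] := by
    have := congrArg String.toList hb
    simpa using this
  -- from the header prefix, line contains a non-space character
  have hE : ∃ c ∈ line.toList, PySem.Chars.isspace c = false := by
    rcases Bool.or_eq_true_iff.mp (by simpa [pvBHeader] using hh) with h | h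
    · have hp : ("Ethernet adapter".toList) <+: line.toList := by
        simpa [PySem.Chars.startswith_iff] using h
      exact ⟨'E', hp.subset (by decide), by decide⟩
    · have hp : ("Wireless LAN adapter".toList) <+: line.toList := by
        simpa [PySem.Chars.startswith_iff] using h
      exact ⟨'W', hp.subset (by decide), by decide⟩
  obtain ⟨c, hc, hcs⟩ := hE
  -- strip = [] forces every character of line to be whitespace
  have hall : ∀ x ∈ List.dropWhile PySem.Chars.isspace line.toList,
      PySem.Chars.isspace x = true := by
    have := hb'
    simp only [PySem.Chars.strip, PySem.Chars.rstrip, PySem.Chars.lstrip,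
      List.reverse_eq_nil_iff, List.dropWhile_eq_nil_iff, List.mem_reverse] at this
    exact this
  have hc' : c ∈ List.dropWhile PySem.Chars.isspace line.toList := by
    have hsplit := List.takeWhile_append_dropWhile (p := PySem.Chars.isspace) (l := line.toList)
    rw [← hsplit] at hc
    rcases List.mem_append.mp hc with h1 | h1
    · exact absurd (List.mem_takeWhile_imp h1) (by simp [hcs])
    · exact h1
  exact absurd (hall c hc') (by simp [hcs])

lemma pv_main (lines : List String) : ∀ (bs : List (List String)) (cb : List String),
    (if (pvALoop lines (pvBFin bs) (pvBuild cb)).2.items.isEmpty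
     then (pvALoop lines (pvBFin bs) (pvBuild cb)).1
     else (pvALoop lines (pvBFin bs) (pvBuild cb)).1 ++
          [(pvALoop lines (pvBFin bs) (pvBuild cb)).2.items])
    = pvBFin ((lines.foldl pvBSplitStep (bs, cb)).1 ++ [(lines.foldl pvBSplitStep (bs, cb)).2]) := by
  induction lines with
  | nil =>
    intro bs cb
    by_cases h : (pvBuild cb).items.isEmpty <;> simp [pvALoop, pvBFin_append, h]
  | cons line rest ih =>
    intro bs cb
    by_cases hb : PySem.Str.strip line = ""
    · have hh : pvBHeader line = false := by
        rcases Bool.eq_false_or_eq_true (pvBHeader line) with h | h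
        · exact absurd hb (pv_header_nonblank line h)
        · exact h
      have hA : pvAHeader line = false := hh
      have hcb : pvBuild (cb ++ [line]) = pvBuild cb := by
        rw [pvBuild_append cb line hh, pvBStep_blank _ _ hb]
      have := ih bs (cb ++ [line])
      rw [hcb] at this
      simpa [pvALoop, pvBSplitStep, hb, hh, hA] using this
    · rcases Bool.eq_false_or_eq_true (pvBHeader line) with hh | hh
      · have hA : pvAHeader line = true := hh
        have hseed : pvBuild [line] = PySem.Dict.ofList [("name", PySem.Str.strip line)] := by
          simp [pvBuild, hh]
        have := ih (bs ++ [cb]) [line]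
        rw [hseed, pvBFin_append] at this
        by_cases he : (pvBuild cb).items.isEmpty
        · simpa [pvALoop, pvBSplitStep, hb, hA, hh, he] using this
        · simpa [pvALoop, pvBSplitStep, hb, hA, hh, he] using this
      · have hA : pvAHeader line = false := hh
        rcases Bool.eq_false_or_eq_true (PySem.Str.isIn ":" line) with hc | hc
        · have hcb : pvBuild (cb ++ [line]) = pvAInsert (pvBuild cb) line := by
            rw [pvBuild_append cb line hh, pvBStep_kv _ _ hb hc]
          have := ih bs (cb ++ [line])
          rw [hcb] at this
          simpa [pvALoop, pvBSplitStep, hb, hA, hh,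
            (show PySem.Chars.isIn [':'] line.toList = true by simpa using hc)] using this
        · have hcb : pvBuild (cb ++ [line]) = pvBuild cb := by
            rw [pvBuild_append cb line hh, pvBStep_nocolon _ _ hc]
          have := ih bs (cb ++ [line])
          rw [hcb] at this
          simpa [pvALoop, pvBSplitStep, hb, hA, hh,
            (show PySem.Chars.isIn [':'] line.toList = false by simpa using hc)] using this

-- ===== VERDICT (by name: the statement is the Claim_ definition above) =====
theorem parse_ipconfig_output_spec : Claim_equal_parse_ipconfig_output := by
  intro s _
  unfold Spec_parse_ipconfig_output parse_ipconfig_output parse_ipconfig_output_alt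
  have h := pv_main ((PySem.Str.split? s "\n").getD []) [] []
  simpa [pvBFin, pvBuild] using h
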